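-- pv_equiv track=rewrite | github.com/Tetsuya3850/DSA-Basics | TreesGraphs/unify_register.py | baby_names
-- ===== SOURCE A (Python) =====
-- from collections import defaultdict
--
-- def baby_names(name_frequency, same_names):
--     # Given two lists, one of names/frequencies and the other of pairs of equivalent names, write an algorithm to print a new list of the true frquency of each name.
--     # Time O(B+P), where B is the num of babies and P is the pair of same names.
--     g = Graph()
--     for synonyms in same_names:
--         g.addEdge(synonyms[0], synonyms[1])
--     visited = set()
--     unified_dict = defaultdict(int)
--     for node in g.graph.keys():
--         if node not in visited:
--             unified_dict[node] = add_all_synonyms(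
--                 node, visited, name_frequency, g)
--     return unified_dict
--
-- class Graph:
--     def __init__(self):
--         self.graph = defaultdict(list)
--         self.nodes = set()
--
--     def addEdge(self, u, v):
--         self.graph[u].append(v)
--         self.graph[v].append(u)
--         self.nodes.add(u)
--         self.nodes.add(v)
--
-- def add_all_synonyms(vertex, visited, name_frequency, g, ):
--     count = 0
--     stack = []
--     stack.append(vertex)
--     visited.add(vertex)
--     count += name_frequency[vertex]
--     while stack:
--         s = stack.pop()
--         for neighbour in g.graph[s]:
--             if neighbour not in visited:
--                 stack.append(neighbour)
--                 visited.add(neighbour)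
--                 count += name_frequency[neighbour]
--     return count
-- ===== SOURCE B (Python) =====
-- from collections import defaultdict
--
-- def baby_names(name_frequency, same_names):
--     # Disjoint-set by label relabelling instead of graph + DFS.
--     label = {}  # name -> current component label; keys in first-appearance order
--     for pair in same_names:
--         u, v = pair[0], pair[1]
--         if u not in label:
--             label[u] = u
--         if v not in label:
--             label[v] = v
--         lu, lv = label[u], label[v]
--         if lu != lv:
--             for x in label:
--                 if label[x] == lu:
--                     label[x] = lv
--     sums = defaultdict(int)
--     for x in label:
--         sums[label[x]] += name_frequency[x]
--     seen = set()
--     result = defaultdict(int)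
--     for x in label:
--         if label[x] not in seen:
--             seen.add(label[x])
--             result[x] = sums[label[x]]
--     return result
-- ===== Notes on version B (the rewrite author's own statement) =====
-- stated objective: alternative
-- what changed: Replaces the adjacency-graph + stack-based DFS component traversal with disjoint-set merging by label relabelling: each pair unions two labels, then per-label sums and first-appearance representatives give the same dict.
import Mathlib
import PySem

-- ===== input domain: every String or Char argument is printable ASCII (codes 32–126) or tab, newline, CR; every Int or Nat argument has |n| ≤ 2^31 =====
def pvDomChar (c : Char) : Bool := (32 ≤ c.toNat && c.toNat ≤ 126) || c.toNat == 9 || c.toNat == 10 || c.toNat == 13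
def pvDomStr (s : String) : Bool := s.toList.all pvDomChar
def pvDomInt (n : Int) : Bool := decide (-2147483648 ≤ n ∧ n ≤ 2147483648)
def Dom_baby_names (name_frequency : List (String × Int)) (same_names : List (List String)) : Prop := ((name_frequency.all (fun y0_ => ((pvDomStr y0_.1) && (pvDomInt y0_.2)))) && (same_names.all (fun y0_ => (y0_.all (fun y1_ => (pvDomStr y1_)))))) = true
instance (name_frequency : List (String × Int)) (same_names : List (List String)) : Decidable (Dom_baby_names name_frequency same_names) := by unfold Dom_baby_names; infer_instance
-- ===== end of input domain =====

-- B replaces A's adjacency graph + stack DFS by disjoint-set merging (label relabelling):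
-- a different algorithm, no speed claim; return values proved identical on Pre_.

-- ===== PORT A =====
-- freq lookup: name_frequency[x] (dict, first-match); Pre_ guarantees the key is present
def pvFreq (nf : List (String × Int)) (x : String) : Int :=
  (PySem.Dict.mk nf).getD x 0

-- ===== PORT A =====
def pvAddEdge (g : PySem.Dict String (List String)) (u v : String) :
    PySem.Dict String (List String) :=
  let g1 := g.insert u (g.getD u [] ++ [v])
  g1.insert v (g1.getD v [] ++ [u])

def pvBuildGraph (same_names : List (List String)) : PySem.Dict String (List String) :=
  same_names.foldl (fun g syn =>
    pvAddEdge g ((PySem.List.pyGet? syn 0).getD "") ((PySem.List.pyGet? syn 1).getD ""))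
    PySem.Dict.empty

def pvPushNbrs (nf : List (String × Int)) (adj : List String)
    (st : List String × PySem.Set String × Int) : List String × PySem.Set String × Int :=
  adj.foldl (fun st n =>
    if n ∈ st.2.1 then st
    else (st.1 ++ [n], PySem.Set.add st.2.1 n, st.2.2 + pvFreq nf n)) st

def pvUnvisCount (U : List String) (vis : PySem.Set String) : Nat :=
  (U.filter (fun x => !(PySem.Set.contains vis x))).length

lemma pvPushNbrs_spec (nf : List (String × Int)) :
    ∀ (adj : List String) (st : List String × PySem.Set String × Int),
    ∃ N : List String,
      pvPushNbrs nf adj st = (st.1 ++ N, st.2.1 ++ N, st.2.2 + (N.map (pvFreq nf)).sum)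
      ∧ N.Nodup ∧ (∀ n ∈ N, n ∈ adj ∧ n ∉ st.2.1) ∧ (∀ n ∈ adj, n ∈ st.2.1 ∨ n ∈ N) := by
  intro adj
  induction adj with
  | nil =>
    intro st
    exact ⟨[], by simp [pvPushNbrs], List.nodup_nil, by simp, by simp⟩
  | cons n adj ih =>
    intro st
    have hcons : ∀ s : List String × PySem.Set String × Int,
        pvPushNbrs nf (n :: adj) s = pvPushNbrs nf adj
          (if n ∈ s.2.1 then s else (s.1 ++ [n], PySem.Set.add s.2.1 n, s.2.2 + pvFreq nf n)) := by
      intro s; simp [pvPushNbrs]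
    by_cases hn : n ∈ st.2.1
    · obtain ⟨N, heq, hnd, hmem, hcov⟩ := ih st
      refine ⟨N, ?_, hnd, fun m hm => ⟨List.mem_cons_of_mem _ (hmem m hm).1, (hmem m hm).2⟩, ?_⟩
      · rw [hcons, if_pos hn]; exact heq
      · intro m hm
        rcases List.mem_cons.mp hm with rfl | hm'
        · exact Or.inl hn
        · exact hcov m hm'
    · have hadd : PySem.Set.add st.2.1 n = st.2.1 ++ [n] := PySem.Set.add_of_not_mem hn
      obtain ⟨N, heq, hnd, hmem, hcov⟩ :=
        ih (st.1 ++ [n], st.2.1 ++ [n], st.2.2 + pvFreq nf n)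
      have hmemn : ∀ m ∈ N, m ∉ st.2.1 ∧ m ≠ n := by
        intro m hm
        have := (hmem m hm).2
        simp only [List.mem_append, List.mem_singleton] at this
        exact ⟨fun h' => this (Or.inl h'), fun h' => this (Or.inr h')⟩
      refine ⟨n :: N, ?_, ?_, ?_, ?_⟩
      · rw [hcons, if_neg hn, hadd, heq]
        refine Prod.ext ?_ (Prod.ext ?_ ?_) <;> first | (simp; ring) | simp
      · exact List.nodup_cons.mpr ⟨fun h' => (hmemn n h').2 rfl, hnd⟩
      · intro m hm
        rcases List.mem_cons.mp hm with rfl | hm'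
        · exact ⟨List.mem_cons_self .., hn⟩
        · exact ⟨List.mem_cons_of_mem _ (hmem m hm').1, (hmemn m hm').1⟩
      · intro m hm
        rcases List.mem_cons.mp hm with rfl | hm'
        · exact Or.inr (List.mem_cons_self ..)
        · rcases hcov m hm' with h' | h'
          · rcases List.mem_append.mp h' with h'' | h''
            · exact Or.inl h''
            · simp only [List.mem_singleton] at h''
              exact Or.inr (h'' ▸ List.mem_cons_self ..)
          · exact Or.inr (List.mem_cons_of_mem _ h')

lemma pvUnvisCount_append (U : List String) :
    ∀ (N : List String) (vis : PySem.Set String), N.Nodup → (∀ n ∈ N, n ∈ U ∧ n ∉ vis) →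
    pvUnvisCount U (vis ++ N) + N.length ≤ pvUnvisCount U vis := by
  intro N
  induction N with
  | nil => intro vis _ _; simp
  | cons n N ih =>
    intro vis hN_orig hmem
    have hstep : pvUnvisCount U (vis ++ [n]) + 1 ≤ pvUnvisCount U vis := by
      have hpred : ∀ x : String,
          (!(PySem.Set.contains (vis ++ [n]) x)) = ((!(x == n)) && !(PySem.Set.contains vis x)) := by
        intro x
        have hbeq : (x == n) = decide (x = n) := by by_cases h : x = n <;> simp [h]
        simp [PySem.Set.contains_eq_listContains, hbeq]
        rw [Bool.and_comm]
      have : pvUnvisCount U (vis ++ [n]) =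
          ((U.filter (fun x => !(PySem.Set.contains vis x))).filter (fun x => !(x == n))).length := by
        unfold pvUnvisCount
        rw [List.filter_filter]
        exact congrArg _ (List.filter_congr (fun x _ => hpred x))
      rw [this]
      have hmemn : n ∈ U.filter (fun x => !(PySem.Set.contains vis x)) := by
        refine List.mem_filter.mpr ⟨(hmem n (List.mem_cons_self ..)).1, ?_⟩
        simp [PySem.Set.contains_eq_listContains]
        exact (hmem n (List.mem_cons_self ..)).2
      have hlt : ((U.filter (fun x => !(PySem.Set.contains vis x))).filter
          (fun x => !(x == n))).length < (U.filter (fun x => !(PySem.Set.contains vis x))).length := by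
        rw [List.length_filter_lt_length_iff_exists]
        exact ⟨n, hmemn, by simp⟩
      unfold pvUnvisCount
      omega
    have hN : N.Nodup := (List.nodup_cons.mp hN_orig).2
    have hnotN : n ∉ N := (List.nodup_cons.mp hN_orig).1
    have ih' := ih (vis ++ [n]) hN ?_
    · have hassoc : vis ++ n :: N = (vis ++ [n]) ++ N := by simp
      rw [hassoc]
      simp only [List.length_cons]
      omega
    · intro m hm
      refine ⟨(hmem m (List.mem_cons_of_mem _ hm)).1, ?_⟩
      simp only [List.mem_append, List.mem_singleton]
      rintro (h' | rfl)
      · exact (hmem m (List.mem_cons_of_mem _ hm)).2 h'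
      · exact hnotN hm

lemma pvGetD_subset_flatten (g : PySem.Dict String (List String)) (s : String) :
    ∀ x ∈ g.getD s [], x ∈ g.values.flatten := by
  intro x hx
  rcases hget : g.get? s with _ | l
  · rw [PySem.Dict.getD_eq_get?_getD, hget] at hx
    simp at hx
  · rw [PySem.Dict.getD_eq_get?_getD, hget] at hx
    simp only [Option.getD_some] at hx
    have hitems := PySem.Dict.mem_items_of_get?_eq_some (d := g) hget
    have hval : l ∈ g.values := by
      simp only [PySem.Dict.values]
      exact List.mem_map.mpr ⟨(s, l), hitems, rfl⟩
    exact List.mem_flatten.mpr ⟨l, hval, hx⟩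

def pvDfsLoop (nf : List (String × Int)) (g : PySem.Dict String (List String)) :
    List String → PySem.Set String → Int → PySem.Set String × Int
  | stack, vis, count =>
    if h : stack = [] then (vis, count)
    else
      let s := stack.getLast h
      let st := pvPushNbrs nf (g.getD s []) (stack.dropLast, vis, count)
      pvDfsLoop nf g st.1 st.2.1 st.2.2
termination_by stack vis _ => stack.length + pvUnvisCount (g.values.flatten) vis
decreasing_by
  obtain ⟨N, heq, hnd, hmem, _⟩ :=
    pvPushNbrs_spec nf (g.getD (stack.getLast h) []) (stack.dropLast, vis, count)
  have hsub : ∀ n ∈ N, n ∈ g.values.flatten ∧ n ∉ vis := fun n hn =>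
    ⟨pvGetD_subset_flatten g (stack.getLast h) n (hmem n hn).1, (hmem n hn).2⟩
  have hle := pvUnvisCount_append (g.values.flatten) N vis hnd hsub
  have hlen : stack.dropLast.length = stack.length - 1 := List.length_dropLast
  have hpos : 0 < stack.length := List.length_pos_of_ne_nil h
  rw [heq]
  simp only [List.length_append]
  omega

def pvAddAllSynonyms (vertex : String) (visited : PySem.Set String)
    (nf : List (String × Int)) (g : PySem.Dict String (List String)) :
    PySem.Set String × Int :=
  pvDfsLoop nf g [vertex] (PySem.Set.add visited vertex) (0 + pvFreq nf vertex)

def pvStepA (nf : List (String × Int)) (g : PySem.Dict String (List String))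
    (st : PySem.Set String × PySem.Dict String Int) (node : String) :
    PySem.Set String × PySem.Dict String Int :=
  if node ∈ st.1 then st
  else
    let r := pvAddAllSynonyms node st.1 nf g
    (r.1, st.2.insert node r.2)

def baby_names (name_frequency : List (String × Int)) (same_names : List (List String)) :
    List (String × Int) :=
  let g := pvBuildGraph same_names
  ((g.keys).foldl (pvStepA name_frequency g) (PySem.Set.empty, PySem.Dict.empty)).2.items

-- ===== PORT B =====
def pvMerge (d : PySem.Dict String String) (lu lv : String) : PySem.Dict String String :=
  d.keys.foldl (fun d' x => if d'.getD x "" = lu then d'.insert x lv else d') d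

def pvStepU (L : PySem.Dict String String) (p : String × String) : PySem.Dict String String :=
  let L1 := if L.contains p.1 then L else L.insert p.1 p.1
  let L2 := if L1.contains p.2 then L1 else L1.insert p.2 p.2
  let lu := L2.getD p.1 ""
  let lv := L2.getD p.2 ""
  if lu ≠ lv then pvMerge L2 lu lv else L2

def pvUnionPairs (same_names : List (List String)) : PySem.Dict String String :=
  same_names.foldl (fun L syn =>
    pvStepU L ((PySem.List.pyGet? syn 0).getD "", (PySem.List.pyGet? syn 1).getD ""))
    PySem.Dict.empty

def pvStepB (L : PySem.Dict String String) (sums : PySem.Dict String Int)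
    (st : PySem.Set String × PySem.Dict String Int) (x : String) :
    PySem.Set String × PySem.Dict String Int :=
  if L.getD x "" ∈ st.1 then st
  else (PySem.Set.add st.1 (L.getD x ""), st.2.insert x (sums.getD (L.getD x "") 0))

def baby_names_alt (name_frequency : List (String × Int)) (same_names : List (List String)) :
    List (String × Int) :=
  let label := pvUnionPairs same_names
  let sums := label.keys.foldl
    (fun d x => d.modify (label.getD x "") 0 (· + pvFreq name_frequency x)) PySem.Dict.empty
  ((label.keys).foldl (pvStepB label sums) (PySem.Set.empty, PySem.Dict.empty)).2.items



-- ===== PRECONDITION & SPEC =====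
-- Pre_: Python A raises IndexError on a pair list of length < 2 and KeyError when a paired
-- name is missing from name_frequency; Pre_ excludes exactly those raising inputs.
def Pre_baby_names (name_frequency : List (String × Int)) (same_names : List (List String)) : Prop :=
  ∀ l ∈ same_names, 2 ≤ l.length ∧
    (PySem.Dict.mk name_frequency).contains ((PySem.List.pyGet? l 0).getD "") = true ∧
    (PySem.Dict.mk name_frequency).contains ((PySem.List.pyGet? l 1).getD "") = true
instance (name_frequency : List (String × Int)) (same_names : List (List String)) : Decidable (Pre_baby_names name_frequency same_names) := by unfold Pre_baby_names; infer_instance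

def pvWitness_baby_names : (List (String × Int)) × List (List String) :=
  ([("a", 2), ("b", 3), ("c", 5)], [["a", "b"], ["c", "c"]])

def Spec_baby_names (name_frequency : List (String × Int)) (same_names : List (List String)) (out : List (String × Int)) : Prop := out = baby_names_alt name_frequency same_names
instance (name_frequency : List (String × Int)) (same_names : List (List String)) (out : List (String × Int)) : Decidable (Spec_baby_names name_frequency same_names out) := by unfold Spec_baby_names; infer_instance

-- ===== CLAIM (what is proved, stated in full; the proofs are below) =====
def Claim_equal_baby_names : Prop := ∀ (name_frequency : List (String × Int)) (same_names : List (List String)), Dom_baby_names name_frequency same_names → Pre_baby_names name_frequency same_names → Spec_baby_names name_frequency same_names (baby_names name_frequency same_names)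

-- ===== LEMMAS AND PROOFS =====
-- ===== proof-side notions =====
def pvPairs (sn : List (List String)) : List (String × String) :=
  sn.map (fun l => ((PySem.List.pyGet? l 0).getD "", (PySem.List.pyGet? l 1).getD ""))

def pvEdge (E : List (String × String)) (a b : String) : Prop :=
  (a, b) ∈ E ∨ (b, a) ∈ E

inductive PvConn (E : List (String × String)) : String → String → Prop
  | edge {a b} : (a, b) ∈ E → PvConn E a b
  | refl (a) : PvConn E a a
  | symm {a b} : PvConn E a b → PvConn E b a
  | trans {a b c} : PvConn E a b → PvConn E b c → PvConn E a c

def pvNodes (E : List (String × String)) : List String :=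
  PySem.List.dedup (E.flatMap (fun p => [p.1, p.2]))

lemma pvConn_of_edge {E : List (String × String)} {a b : String} (h : pvEdge E a b) :
    PvConn E a b := by
  rcases h with h | h
  · exact .edge h
  · exact .symm (.edge h)

lemma pvConn_closed {E : List (String × String)} {T : List String}
    (hT : ∀ a ∈ T, ∀ b, pvEdge E a b → b ∈ T) {a b : String} (h : PvConn E a b) :
    a ∈ T ↔ b ∈ T := by
  induction h with
  | edge hm => exact ⟨fun ha => hT _ ha _ (Or.inl hm), fun hb => hT _ hb _ (Or.inr hm)⟩
  | refl a => exact Iff.rfl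
  | symm _ ih => exact ih.symm
  | trans _ _ ih1 ih2 => exact ih1.trans ih2

lemma pvEdge_mem_nodes {E : List (String × String)} {a b : String} (h : pvEdge E a b) :
    a ∈ pvNodes E ∧ b ∈ pvNodes E := by
  unfold pvNodes
  rcases h with h | h <;>
    exact ⟨(PySem.List.mem_dedup _ _).mpr (List.mem_flatMap.mpr ⟨_, h, by simp⟩),
           (PySem.List.mem_dedup _ _).mpr (List.mem_flatMap.mpr ⟨_, h, by simp⟩)⟩

lemma pvNodes_nodup (E : List (String × String)) : (pvNodes E).Nodup :=
  PySem.List.nodup_dedup _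

lemma pvConn_eq_or_mem {E : List (String × String)} {a b : String} (h : PvConn E a b) :
    a = b ∨ (a ∈ pvNodes E ∧ b ∈ pvNodes E) := by
  induction h with
  | edge hm => exact Or.inr (pvEdge_mem_nodes (Or.inl hm))
  | refl a => exact Or.inl rfl
  | symm _ ih => rcases ih with rfl | ⟨h1, h2⟩; exacts [Or.inl rfl, Or.inr ⟨h2, h1⟩]
  | trans _ _ ih1 ih2 =>
    rcases ih1 with rfl | ⟨h1, h2⟩
    · exact ih2
    · rcases ih2 with rfl | ⟨h3, h4⟩
      · exact Or.inr ⟨h1, h2⟩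
      · exact Or.inr ⟨h1, h4⟩

lemma pvConn_mono {E : List (String × String)} {e : String × String} {a b : String}
    (h : PvConn E a b) : PvConn (E ++ [e]) a b := by
  induction h with
  | edge hm => exact .edge (List.mem_append_left _ hm)
  | refl a => exact .refl a
  | symm _ ih => exact .symm ih
  | trans _ _ ih1 ih2 => exact .trans ih1 ih2

lemma pvConn_append_single {E : List (String × String)} {u v x y : String} :
    PvConn (E ++ [(u, v)]) x y ↔
      PvConn E x y ∨ (PvConn E x u ∧ PvConn E v y) ∨ (PvConn E x v ∧ PvConn E u y) := by
  constructor
  · intro h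
    induction h with
    | edge hm =>
      rcases List.mem_append.mp hm with hm | hm
      · exact Or.inl (.edge hm)
      · simp only [List.mem_singleton, Prod.mk.injEq] at hm
        exact Or.inr (Or.inl ⟨hm.1 ▸ .refl _, hm.2 ▸ .refl _⟩)
    | refl a => exact Or.inl (.refl a)
    | symm _ ih =>
      rcases ih with h1 | ⟨h1, h2⟩ | ⟨h1, h2⟩
      · exact Or.inl h1.symm
      · exact Or.inr (Or.inr ⟨h2.symm, h1.symm⟩)
      · exact Or.inr (Or.inl ⟨h2.symm, h1.symm⟩)
    | trans _ _ ih1 ih2 =>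
      rcases ih1 with h1 | ⟨ha, hb⟩ | ⟨ha, hb⟩ <;>
        rcases ih2 with h2 | ⟨hc, hd⟩ | ⟨hc, hd⟩
      · exact Or.inl (h1.trans h2)
      · exact Or.inr (Or.inl ⟨h1.trans hc, hd⟩)
      · exact Or.inr (Or.inr ⟨h1.trans hc, hd⟩)
      · exact Or.inr (Or.inl ⟨ha, hb.trans h2⟩)
      · exact Or.inr (Or.inl ⟨ha, hd⟩)
      · exact Or.inl (ha.trans hd)
      · exact Or.inr (Or.inr ⟨ha, hb.trans h2⟩)
      · exact Or.inl (ha.trans hd)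
      · exact Or.inr (Or.inr ⟨ha, hd⟩)
  · rintro (h | ⟨h1, h2⟩ | ⟨h1, h2⟩)
    · exact pvConn_mono h
    · exact .trans (pvConn_mono h1) (.trans (.edge (List.mem_append_right _ (by simp)))
        (pvConn_mono h2))
    · exact .trans (pvConn_mono h1) (.trans (.symm (.edge (List.mem_append_right _ (by simp))))
        (pvConn_mono h2))

lemma pvNodes_append (E : List (String × String)) (u v : String) :
    pvNodes (E ++ [(u, v)]) = PySem.Set.add (PySem.Set.add (pvNodes E) u) v := by
  unfold pvNodes
  rw [List.flatMap_append]
  simp only [PySem.List.dedup_eq_ofList]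
  rw [PySem.Set.ofList_append]
  simp [PySem.Set.update_cons, PySem.Set.update_nil]

-- ===== graph-side characterisation =====
lemma pvKeys_insert_eq_add {ν : Type} (d : PySem.Dict String ν) (k : String) (w : ν) :
    (d.insert k w).keys = PySem.Set.add d.keys k := by
  by_cases h : d.contains k
  · rw [PySem.Dict.keys_insert_of_contains _ _ h, PySem.Set.add_of_mem]
    exact (PySem.Dict.contains_iff_mem_keys _ _).mp h
  · rw [PySem.Dict.keys_insert_of_not_contains _ _ (by simpa using h),
      PySem.Set.add_of_not_mem]
    intro hm
    exact h ((PySem.Dict.contains_iff_mem_keys _ _).mpr hm)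

lemma pvAddEdge_keys (g : PySem.Dict String (List String)) (u v : String) :
    (pvAddEdge g u v).keys = PySem.Set.add (PySem.Set.add g.keys u) v := by
  unfold pvAddEdge
  rw [pvKeys_insert_eq_add, pvKeys_insert_eq_add]

lemma pvAddEdge_adj (g : PySem.Dict String (List String)) (u v a b : String) :
    b ∈ (pvAddEdge g u v).getD a [] ↔
      b ∈ g.getD a [] ∨ (a = u ∧ b = v) ∨ (a = v ∧ b = u) := by
  unfold pvAddEdge
  simp only [PySem.Dict.getD_insert]
  rcases eq_or_ne u v with rfl | huv
  · by_cases hav : a = u <;> simp [hav, List.mem_append]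
  · have hvu : v ≠ u := huv.symm
    by_cases hav : a = v <;> by_cases hau : a = u <;>
      simp [hav, hau, huv, hvu, List.mem_append]

def pvBuildE (E : List (String × String)) : PySem.Dict String (List String) :=
  E.foldl (fun g p => pvAddEdge g p.1 p.2) PySem.Dict.empty

lemma pvBuildGraph_eq (sn : List (List String)) : pvBuildGraph sn = pvBuildE (pvPairs sn) := by
  unfold pvBuildGraph pvBuildE pvPairs
  rw [List.foldl_map]

lemma pvBuildE_keys_aux (E : List (String × String)) :
    ∀ g0 : PySem.Dict String (List String),
    (E.foldl (fun g p => pvAddEdge g p.1 p.2) g0).keys =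
      PySem.Set.update g0.keys (E.flatMap (fun p => [p.1, p.2])) := by
  induction E with
  | nil => intro g0; simp [PySem.Set.update_nil]
  | cons p E ih =>
    intro g0
    rw [List.foldl_cons, ih, pvAddEdge_keys]
    simp [PySem.Set.update_cons]

lemma pvBuildE_keys (E : List (String × String)) : (pvBuildE E).keys = pvNodes E := by
  unfold pvBuildE pvNodes
  rw [pvBuildE_keys_aux]
  simp only [PySem.Dict.keys_empty, PySem.List.dedup_eq_ofList]
  rfl

lemma pvBuildE_adj_aux (E : List (String × String)) :
    ∀ (g0 : PySem.Dict String (List String)) (a b : String),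
    b ∈ (E.foldl (fun g p => pvAddEdge g p.1 p.2) g0).getD a [] ↔
      b ∈ g0.getD a [] ∨ pvEdge E a b := by
  induction E with
  | nil => intro g0 a b; simp [pvEdge]
  | cons p E ih =>
    intro g0 a b
    rw [List.foldl_cons, ih, pvAddEdge_adj]
    unfold pvEdge
    constructor
    · rintro ((h | ⟨rfl, rfl⟩ | ⟨rfl, rfl⟩) | h | h)
      · exact Or.inl h
      · exact Or.inr (Or.inl (List.mem_cons_self ..))
      · exact Or.inr (Or.inr (List.mem_cons_self ..))
      · exact Or.inr (Or.inl (List.mem_cons_of_mem _ h))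
      · exact Or.inr (Or.inr (List.mem_cons_of_mem _ h))
    · rintro (h | h | h)
      · exact Or.inl (Or.inl h)
      · rcases List.mem_cons.mp h with h' | h'
        · have : a = p.1 ∧ b = p.2 := by
            have := congrArg Prod.fst h'
            have := congrArg Prod.snd h'
            simp_all
          exact Or.inl (Or.inr (Or.inl this))
        · exact Or.inr (Or.inl h')
      · rcases List.mem_cons.mp h with h' | h'
        · have : a = p.2 ∧ b = p.1 := by
            have := congrArg Prod.fst h'
            have := congrArg Prod.snd h'
            simp_all
          exact Or.inl (Or.inr (Or.inr this))
        · exact Or.inr (Or.inr h')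

lemma pvBuildE_adj (E : List (String × String)) (a b : String) :
    b ∈ (pvBuildE E).getD a [] ↔ pvEdge E a b := by
  unfold pvBuildE
  rw [pvBuildE_adj_aux]
  simp [PySem.Dict.getD_empty]

-- ===== label-side characterisation =====
lemma pvMergeFold_getD (lu lv : String) :
    ∀ (l : List String) (d : PySem.Dict String String), l.Nodup → ∀ y : String,
    ((l.foldl (fun d' x => if d'.getD x "" = lu then d'.insert x lv else d') d).getD y "") =
      if y ∈ l ∧ d.getD y "" = lu then lv else d.getD y "" := by
  intro l
  induction l with
  | nil => intro d _ y; simp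
  | cons x l ih =>
    intro d hnd y
    rw [List.foldl_cons, ih _ (List.nodup_cons.mp hnd).2 y]
    have hx : x ∉ l := (List.nodup_cons.mp hnd).1
    by_cases hyx : y = x
    · subst hyx
      by_cases hl : d.getD y "" = lu
      · simp [hl, hx, PySem.Dict.getD_insert_self]
      · simp [hl, hx]
    · by_cases hl : d.getD x "" = lu
      · rw [if_pos hl, PySem.Dict.getD_insert]
        simp [hyx, List.mem_cons]
      · rw [if_neg hl]
        simp [hyx, List.mem_cons]

lemma pvMergeFold_keys (lu lv : String) :
    ∀ (l : List String) (d : PySem.Dict String String), (∀ x ∈ l, x ∈ d.keys) →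
    ((l.foldl (fun d' x => if d'.getD x "" = lu then d'.insert x lv else d') d).keys = d.keys) := by
  intro l
  induction l with
  | nil => intro d _; simp
  | cons x l ih =>
    intro d hmem
    rw [List.foldl_cons]
    have hkeys : (if d.getD x "" = lu then d.insert x lv else d).keys = d.keys := by
      by_cases hl : d.getD x "" = lu
      · rw [if_pos hl]
        exact PySem.Dict.keys_insert_of_contains _ _
          ((PySem.Dict.contains_iff_mem_keys _ _).mpr (hmem x (List.mem_cons_self ..)))
      · rw [if_neg hl]
    rw [ih _ (fun z hz => by rw [hkeys]; exact hmem z (List.mem_cons_of_mem _ hz)), hkeys]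

lemma pvMerge_keys (d : PySem.Dict String String) (lu lv : String) :
    (pvMerge d lu lv).keys = d.keys :=
  pvMergeFold_keys lu lv d.keys d (fun _ h => h)

lemma pvMerge_getD (d : PySem.Dict String String) (hnd : d.keys.Nodup) (lu lv y : String) :
    (pvMerge d lu lv).getD y "" =
      if y ∈ d.keys ∧ d.getD y "" = lu then lv else d.getD y "" :=
  pvMergeFold_getD lu lv d.keys d hnd y

lemma pvEnsure_keys (L : PySem.Dict String String) (u : String) :
    (if L.contains u then L else L.insert u u).keys = PySem.Set.add L.keys u := by
  by_cases h : L.contains u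
  · rw [if_pos h, PySem.Set.add_of_mem ((PySem.Dict.contains_iff_mem_keys _ _).mp h)]
  · rw [if_neg h, PySem.Dict.keys_insert_of_not_contains _ _ (by simpa using h),
      PySem.Set.add_of_not_mem]
    intro hm
    exact h ((PySem.Dict.contains_iff_mem_keys _ _).mpr hm)

lemma pvEnsure_getD_mem (L : PySem.Dict String String) (u x : String) (hx : x ∈ L.keys) :
    (if L.contains u then L else L.insert u u).getD x "" = L.getD x "" := by
  by_cases h : L.contains u
  · rw [if_pos h]
  · rw [if_neg h]
    refine PySem.Dict.getD_insert_of_ne _ _ _ (fun hxu => ?_)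
    subst hxu
    exact h ((PySem.Dict.contains_iff_mem_keys _ _).mpr hx)

lemma pvEnsure_getD_self (L : PySem.Dict String String) (u : String) :
    (if L.contains u then L else L.insert u u).getD u "" =
      if u ∈ L.keys then L.getD u "" else u := by
  by_cases h : L.contains u
  · rw [if_pos h, if_pos ((PySem.Dict.contains_iff_mem_keys _ _).mp h)]
  · rw [if_neg h, if_neg (fun hm => h ((PySem.Dict.contains_iff_mem_keys _ _).mpr hm)),
      PySem.Dict.getD_insert_self]

def pvUnionE (E : List (String × String)) : PySem.Dict String String :=
  E.foldl pvStepU PySem.Dict.empty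

lemma pvUnionPairs_eq (sn : List (List String)) : pvUnionPairs sn = pvUnionE (pvPairs sn) := by
  unfold pvUnionPairs pvUnionE pvPairs
  rw [List.foldl_map]

lemma pvUnionE_inv (E : List (String × String)) :
    (pvUnionE E).keys = pvNodes E ∧
    (∀ x ∈ pvNodes E, (pvUnionE E).getD x "" ∈ pvNodes E) ∧
    (∀ x ∈ pvNodes E, ∀ y ∈ pvNodes E,
      ((pvUnionE E).getD x "" = (pvUnionE E).getD y "" ↔ PvConn E x y)) := by
  induction E using List.reverseRecOn with
  | nil =>
    refine ⟨rfl, by simp [pvNodes, PySem.List.dedup], by simp [pvNodes, PySem.List.dedup]⟩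
  | append_singleton E e ih =>
    obtain ⟨u, v⟩ := e
    obtain ⟨hk0, hv0, hiff0⟩ := ih
    have hfold : pvUnionE (E ++ [(u, v)]) = pvStepU (pvUnionE E) (u, v) := by
      unfold pvUnionE
      rw [List.foldl_append, List.foldl_cons, List.foldl_nil]
    set L0 := pvUnionE E with hL0
    set K0 := pvNodes E with hK0
    set K2 := PySem.Set.add (PySem.Set.add K0 u) v with hK2
    have hnodes' : pvNodes (E ++ [(u, v)]) = K2 := pvNodes_append E u v
    have hK0nodup : K0.Nodup := pvNodes_nodup E
    have hK2nodup : K2.Nodup := PySem.Set.nodup_add _ _ (PySem.Set.nodup_add _ _ hK0nodup)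
    have hmemK2 : ∀ z, z ∈ K2 ↔ z ∈ K0 ∨ z = u ∨ z = v := by
      intro z
      rw [hK2, PySem.Set.mem_add, PySem.Set.mem_add]
      tauto
    -- the two "ensure" steps
    set L1 := if L0.contains u then L0 else L0.insert u u with hL1
    set L2 := if L1.contains v then L1 else L1.insert v v with hL2
    have hk1 : L1.keys = PySem.Set.add K0 u := by rw [hL1, pvEnsure_keys, hk0]
    have hk2 : L2.keys = K2 := by rw [hL2, pvEnsure_keys, hk1, hK2]
    have h2old : ∀ x ∈ K0, L2.getD x "" = L0.getD x "" := by
      intro x hx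
      rw [hL2, pvEnsure_getD_mem _ _ _ (by rw [hk1]; exact (PySem.Set.mem_add _ _ _).mpr (Or.inl hx)),
        hL1, pvEnsure_getD_mem _ _ _ (by rw [hk0]; exact hx)]
    have h2new : ∀ z ∈ K2, L2.getD z "" = if z ∈ K0 then L0.getD z "" else z := by
      intro z hz
      by_cases hzK0 : z ∈ K0
      · rw [if_pos hzK0]; exact h2old z hzK0
      · rw [if_neg hzK0]
        rcases (hmemK2 z).mp hz with h | rfl | rfl
        · exact absurd h hzK0
        · -- z = u, fresh
          rw [hL2, pvEnsure_getD_mem _ _ _ (by rw [hk1]; exact (PySem.Set.mem_add _ _ _).mpr (Or.inr rfl)),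
            hL1, pvEnsure_getD_self, hk0, if_neg hzK0]
        · -- z = v, possibly = u
          rw [hL2, pvEnsure_getD_self, hk1]
          by_cases hvu : z = u
          · rw [if_pos ((PySem.Set.mem_add _ _ _).mpr (Or.inr hvu)), hL1, hvu,
              pvEnsure_getD_self, hk0, if_neg (hvu ▸ hzK0)]
          · rw [if_neg (fun hm => by
              rcases (PySem.Set.mem_add _ _ _).mp hm with h | h
              exacts [hzK0 h, hvu h])]
    have hval2 : ∀ z ∈ K2, L2.getD z "" ∈ K2 := by
      intro z hz
      rw [h2new z hz]
      by_cases hzK0 : z ∈ K0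
      · rw [if_pos hzK0]
        exact (hmemK2 _).mpr (Or.inl (hv0 z hzK0))
      · rw [if_neg hzK0]; exact hz
    have hiff2 : ∀ x ∈ K2, ∀ y ∈ K2, (L2.getD x "" = L2.getD y "" ↔ PvConn E x y) := by
      intro x hx y hy
      rw [h2new x hx, h2new y hy]
      by_cases hxK0 : x ∈ K0 <;> by_cases hyK0 : y ∈ K0
      · rw [if_pos hxK0, if_pos hyK0]; exact hiff0 x hxK0 y hyK0
      · rw [if_pos hxK0, if_neg hyK0]
        constructor
        · intro h
          exact absurd (h ▸ hv0 x hxK0) hyK0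
        · intro h
          rcases pvConn_eq_or_mem h with rfl | ⟨_, h2⟩
          exacts [absurd hxK0 hyK0, absurd h2 hyK0]
      · rw [if_neg hxK0, if_pos hyK0]
        constructor
        · intro h
          exact absurd (h ▸ hv0 y hyK0) hxK0
        · intro h
          rcases pvConn_eq_or_mem h with rfl | ⟨h1, _⟩
          exacts [absurd hyK0 hxK0, absurd h1 hxK0]
      · rw [if_neg hxK0, if_neg hyK0]
        constructor
        · rintro rfl; exact .refl x
        · intro h
          rcases pvConn_eq_or_mem h with rfl | ⟨h1, _⟩
          exacts [rfl, absurd h1 hxK0]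
    have huK2 : u ∈ K2 := (hmemK2 u).mpr (Or.inr (Or.inl rfl))
    have hvK2 : v ∈ K2 := (hmemK2 v).mpr (Or.inr (Or.inr rfl))
    have hstep : pvStepU L0 (u, v) =
        if L2.getD u "" ≠ L2.getD v "" then pvMerge L2 (L2.getD u "") (L2.getD v "") else L2 := by
      rw [pvStepU, ← hL1, ← hL2]
    rw [hfold, hstep, hnodes']
    by_cases hlul : L2.getD u "" = L2.getD v ""
    · rw [if_neg (by simpa using hlul)]
      have huv : PvConn E u v := (hiff2 u huK2 v hvK2).mp hlul
      refine ⟨hk2, hval2, ?_⟩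
      intro x hx y hy
      rw [pvConn_append_single]
      constructor
      · intro h
        exact Or.inl ((hiff2 x hx y hy).mp h)
      · rintro (h | ⟨h1, h2⟩ | ⟨h1, h2⟩)
        · exact (hiff2 x hx y hy).mpr h
        · exact (hiff2 x hx y hy).mpr ((h1.trans huv).trans h2)
        · exact (hiff2 x hx y hy).mpr ((h1.trans huv.symm).trans h2)
    · rw [if_pos (by simpa using hlul)]
      have hnuv : ¬ PvConn E u v := fun h => hlul ((hiff2 u huK2 v hvK2).mpr h)
      have hk2nodup : L2.keys.Nodup := by rw [hk2]; exact hK2nodup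
      have hmget : ∀ z ∈ K2, (pvMerge L2 (L2.getD u "") (L2.getD v "")).getD z "" =
          if L2.getD z "" = L2.getD u "" then L2.getD v "" else L2.getD z "" := by
        intro z hz
        rw [pvMerge_getD _ hk2nodup]
        rw [hk2]
        simp [hz]
      refine ⟨by rw [pvMerge_keys, hk2], ?_, ?_⟩
      · intro z hz
        rw [hmget z hz]
        by_cases h : L2.getD z "" = L2.getD u ""
        · rw [if_pos h]; exact hval2 v hvK2
        · rw [if_neg h]; exact hval2 z hz
      · intro x hx y hy
        rw [hmget x hx, hmget y hy, pvConn_append_single]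
        have hxu : (L2.getD x "" = L2.getD u "") ↔ PvConn E x u := hiff2 x hx u huK2
        have hyu : (L2.getD y "" = L2.getD u "") ↔ PvConn E y u := hiff2 y hy u huK2
        have hxv : (L2.getD x "" = L2.getD v "") ↔ PvConn E x v := hiff2 x hx v hvK2
        have hyv : (L2.getD y "" = L2.getD v "") ↔ PvConn E y v := hiff2 y hy v hvK2
        have hxy : (L2.getD x "" = L2.getD y "") ↔ PvConn E x y := hiff2 x hx y hy
        by_cases h1 : L2.getD x "" = L2.getD u "" <;> by_cases h2 : L2.getD y "" = L2.getD u ""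
        · rw [if_pos h1, if_pos h2]
          constructor
          · intro _
            exact Or.inl ((hxu.mp h1).trans (hyu.mp h2).symm)
          · intro _
            rfl
        · rw [if_pos h1, if_neg h2]
          constructor
          · intro h
            exact Or.inr (Or.inl ⟨hxu.mp h1, (hyv.mp h.symm).symm⟩)
          · rintro (h | ⟨ha, hb⟩ | ⟨ha, hb⟩)
            · exact absurd (hyu.mpr (h.symm.trans (hxu.mp h1))) h2
            · exact (hyv.mpr hb.symm).symm
            · exact absurd (hyu.mpr hb.symm) h2
        · rw [if_neg h1, if_pos h2]
          constructor
          · intro h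
            exact Or.inr (Or.inr ⟨hxv.mp h, (hyu.mp h2).symm⟩)
          · rintro (h | ⟨ha, hb⟩ | ⟨ha, hb⟩)
            · exact absurd (hxu.mpr (h.trans (hyu.mp h2))) h1
            · exact absurd (hxu.mpr ha) h1
            · exact hxv.mpr ha
        · rw [if_neg h1, if_neg h2]
          rw [hxy]
          constructor
          · exact Or.inl
          · rintro (h | ⟨ha, hb⟩ | ⟨ha, hb⟩)
            · exact h
            · exact absurd (hxu.mpr ha) h1
            · exact absurd (hyu.mpr hb.symm) h2

-- ===== per-label sums characterisation =====
lemma pvSumsFold_getD (nf : List (String × Int)) (L : PySem.Dict String String) :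
    ∀ (K : List String) (d : PySem.Dict String Int) (c : String),
    (K.foldl (fun d x => d.modify (L.getD x "") 0 (· + pvFreq nf x)) d).getD c 0 =
      d.getD c 0 + ((K.filter (fun x => L.getD x "" == c)).map (pvFreq nf)).sum := by
  intro K
  induction K with
  | nil => intro d c; simp
  | cons x K ih =>
    intro d c
    rw [List.foldl_cons, ih, PySem.Dict.getD_modify]
    by_cases hc : c = L.getD x ""
    · rw [if_pos hc, List.filter_cons_of_pos (by simp [hc.symm]), List.map_cons, List.sum_cons,
        hc]
      ring
    · rw [if_neg hc, List.filter_cons_of_neg (by simp; exact fun h => hc h.symm)]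

-- ===== DFS correctness =====
lemma pvDfsLoop_correct (nf : List (String × Int)) (E : List (String × String))
    (g : PySem.Dict String (List String))
    (hg : ∀ a b : String, b ∈ g.getD a [] ↔ pvEdge E a b) (r : String) (c0 : Int) :
    ∀ (stack : List String) (vis : PySem.Set String) (count : Int),
    ∀ (V S : List String),
      vis = V ++ S →
      (V ++ S).Nodup →
      (∀ x ∈ stack, x ∈ S) →
      r ∈ S →
      (∀ x ∈ S, PvConn E r x) →
      (∀ a ∈ V, ∀ b, pvEdge E a b → b ∈ V) →
      (∀ a ∈ S, a ∉ stack → ∀ b, pvEdge E a b → b ∈ V ++ S) →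
      count = c0 + (S.map (pvFreq nf)).sum →
      ∃ S', pvDfsLoop nf g stack vis count = (V ++ S', c0 + (S'.map (pvFreq nf)).sum)
        ∧ (V ++ S').Nodup
        ∧ (∀ x, x ∈ S' ↔ PvConn E r x ∧ x ∉ V) := by
  intro stack vis count
  induction stack, vis, count using pvDfsLoop.induct nf g with
  | case1 vis count =>
    intro V S hvis hnodup hstack hr hconn hVclosed hfront hcount
    refine ⟨S, ?_, hnodup, ?_⟩
    · rw [pvDfsLoop, hvis, hcount]
      simp
    · intro x
      constructor
      · intro hxS
        refine ⟨hconn x hxS, fun hxV => ?_⟩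
        exact (List.disjoint_of_nodup_append hnodup) hxV hxS
      · rintro ⟨hcx, hxnV⟩
        have hTclosed : ∀ a ∈ V ++ S, ∀ b, pvEdge E a b → b ∈ V ++ S := by
          intro a ha b hedge
          rcases List.mem_append.mp ha with ha | ha
          · exact List.mem_append_left _ (hVclosed a ha b hedge)
          · exact hfront a ha (by simp) b hedge
        have hxT : x ∈ V ++ S :=
          (pvConn_closed hTclosed hcx).mp (List.mem_append_right _ hr)
        rcases List.mem_append.mp hxT with h | h
        · exact absurd h hxnV
        · exact h
  | case2 stack vis count h s st ih =>
    intro V S hvis hnodup hstack hr hconn hVclosed hfront hcount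
    obtain ⟨N, heq, hndN, hmemN, hcovN⟩ :=
      pvPushNbrs_spec nf (g.getD (stack.getLast h) []) (stack.dropLast, vis, count)
    simp only [st, s] at ih
    rw [heq] at ih

    have hunfold : pvDfsLoop nf g stack vis count =
        pvDfsLoop nf g (stack.dropLast ++ N) (vis ++ N) (count + (N.map (pvFreq nf)).sum) := by
      rw [pvDfsLoop]
      simp only [dif_neg h]
      rw [heq]
    have hs_stack : stack.getLast h ∈ stack := List.getLast_mem h
    have hsS : stack.getLast h ∈ S := hstack _ hs_stack
    have hdisj : ∀ n ∈ N, n ∉ V ++ S := by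
      intro n hn
      rw [← hvis]
      exact (hmemN n hn).2
    have hvis' : vis ++ N = V ++ (S ++ N) := by rw [hvis, List.append_assoc]
    have hnodup' : (V ++ (S ++ N)).Nodup := by
      rw [← List.append_assoc]
      exact List.Nodup.append hnodup hndN (fun a ha hn => hdisj a hn ha)
    have hstack' : ∀ x ∈ stack.dropLast ++ N, x ∈ S ++ N := by
      intro x hx
      rcases List.mem_append.mp hx with hx | hx
      · exact List.mem_append_left _ (hstack x ((List.dropLast_sublist _).subset hx))
      · exact List.mem_append_right _ hx
    have hconn' : ∀ x ∈ S ++ N, PvConn E r x := by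
      intro x hx
      rcases List.mem_append.mp hx with hx | hx
      · exact hconn x hx
      · exact (hconn _ hsS).trans (pvConn_of_edge ((hg _ x).mp (hmemN x hx).1))
    have hfront' : ∀ a ∈ S ++ N, a ∉ stack.dropLast ++ N → ∀ b, pvEdge E a b →
        b ∈ V ++ (S ++ N) := by
      intro a ha hna b hedge
      rcases List.mem_append.mp ha with ha | ha
      · by_cases has : a = stack.getLast h
        · have hb : b ∈ g.getD (stack.getLast h) [] := (hg _ b).mpr (has ▸ hedge)
          rcases hcovN b hb with hbv | hbn
          · rw [hvis] at hbv
            rw [← List.append_assoc]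
            exact List.mem_append_left _ hbv
          · rw [← List.append_assoc]
            exact List.mem_append_right _ hbn
        · have hnstack : a ∉ stack := by
            rw [← List.dropLast_append_getLast h]
            intro hmem
            rcases List.mem_append.mp hmem with hmem | hmem
            · exact hna (List.mem_append_left _ hmem)
            · simp only [List.mem_singleton] at hmem
              exact has hmem
          have := hfront a ha hnstack b hedge
          rw [← List.append_assoc]
          exact List.mem_append_left _ this
      · exact absurd (List.mem_append_right _ ha) hna
    have hcount' : count + (N.map (pvFreq nf)).sum =
        c0 + ((S ++ N).map (pvFreq nf)).sum := by
      rw [hcount, List.map_append, List.sum_append]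
      ring
    obtain ⟨S', h1, h2, h3⟩ := ih V (S ++ N) hvis' hnodup' hstack'
      (List.mem_append_left _ hr) hconn' hVclosed hfront' hcount'
    exact ⟨S', by rw [hunfold]; exact h1, h2, h3⟩

-- ===== the two output loops agree =====
lemma pvOuter_joint (nf : List (String × Int)) (E : List (String × String))
    (g : PySem.Dict String (List String)) (L : PySem.Dict String String)
    (sums : PySem.Dict String Int)
    (hg : ∀ a b : String, b ∈ g.getD a [] ↔ pvEdge E a b)
    (hLiff : ∀ x ∈ pvNodes E, ∀ y ∈ pvNodes E, (L.getD x "" = L.getD y "" ↔ PvConn E x y))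
    (hsums : ∀ c : String, sums.getD c 0 =
      (((pvNodes E).filter (fun x => L.getD x "" == c)).map (pvFreq nf)).sum) :
    ∀ (rest p : List String) (visA : PySem.Set String) (dA : PySem.Dict String Int)
      (seen : PySem.Set String) (dB : PySem.Dict String Int),
      p ++ rest = pvNodes E →
      (∀ x, x ∈ visA ↔ ∃ q ∈ p, PvConn E q x) →
      visA.Nodup →
      (∀ a ∈ visA, ∀ b, pvEdge E a b → b ∈ visA) →
      (∀ c, c ∈ seen ↔ ∃ q ∈ p, c = L.getD q "") →
      dA = dB →
      (rest.foldl (pvStepA nf g) (visA, dA)).2 = (rest.foldl (pvStepB L sums) (seen, dB)).2 := by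
  intro rest
  induction rest with
  | nil =>
    intro p visA dA seen dB _ _ _ _ _ hd
    simpa using hd
  | cons k rest ih =>
    intro p visA dA seen dB hsplit hvisA hnodupA hclosed hseen hd
    have hsplit' : (p ++ [k]) ++ rest = pvNodes E := by simpa using hsplit
    have hkE : k ∈ pvNodes E := by
      rw [← hsplit]
      exact List.mem_append_right _ (List.mem_cons_self ..)
    have hpE : ∀ q ∈ p, q ∈ pvNodes E := by
      intro q hq
      rw [← hsplit]
      exact List.mem_append_left _ hq
    have hcond : k ∈ visA ↔ L.getD k "" ∈ seen := by
      rw [hvisA, hseen]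
      constructor
      · rintro ⟨q, hq, hc⟩
        exact ⟨q, hq, ((hLiff q (hpE q hq) k hkE).mpr hc).symm ▸ rfl⟩
      · rintro ⟨q, hq, hc⟩
        exact ⟨q, hq, (hLiff q (hpE q hq) k hkE).mp hc.symm⟩
    rw [List.foldl_cons, List.foldl_cons]
    by_cases hk : k ∈ visA
    · rw [show pvStepA nf g (visA, dA) k = (visA, dA) by simp [pvStepA, hk],
        show pvStepB L sums (seen, dB) k = (seen, dB) by simp [pvStepB, hcond.mp hk]]
      refine ih (p ++ [k]) visA dA seen dB hsplit' ?_ hnodupA hclosed ?_ hd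
      · intro x
        rw [hvisA]
        constructor
        · rintro ⟨q, hq, hc⟩
          exact ⟨q, List.mem_append_left _ hq, hc⟩
        · rintro ⟨q, hq, hc⟩
          rcases List.mem_append.mp hq with hq | hq
          · exact ⟨q, hq, hc⟩
          · simp only [List.mem_singleton] at hq
            obtain ⟨q0, hq0, hc0⟩ := (hvisA k).mp hk
            exact ⟨q0, hq0, hc0.trans (hq ▸ hc)⟩
      · intro c
        rw [hseen]
        constructor
        · rintro ⟨q, hq, hc⟩
          exact ⟨q, List.mem_append_left _ hq, hc⟩
        · rintro ⟨q, hq, hc⟩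
          rcases List.mem_append.mp hq with hq | hq
          · exact ⟨q, hq, hc⟩
          · simp only [List.mem_singleton] at hq
            obtain ⟨q0, hq0, hc0⟩ := (hseen _).mp (hcond.mp hk)
            exact ⟨q0, hq0, (hq ▸ hc).trans hc0⟩
    · have hkB : L.getD k "" ∉ seen := fun hs => hk (hcond.mpr hs)
      have hnotconn : ¬ ∃ q ∈ p, PvConn E q k := fun hc => hk ((hvisA k).mpr hc)
      have hkvis : k ∉ visA := hk
      -- run the DFS lemma for the emitted component
      obtain ⟨S', heqD, hnodD, hcharD⟩ :=
        pvDfsLoop_correct nf E g hg k 0 [k] (PySem.Set.add visA k) (0 + pvFreq nf k)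
          visA [k]
          (by rw [PySem.Set.add_of_not_mem hkvis])
          (by exact List.Nodup.append hnodupA (List.nodup_singleton k)
                (fun a ha hb => by
                  simp only [List.mem_singleton] at hb
                  exact hk (hb ▸ ha)))
          (fun x hx => hx) (List.mem_cons_self ..)
          (by
            intro x hx
            simp only [List.mem_singleton] at hx
            cases hx
            exact .refl _)
          hclosed
          (by
            intro a ha hna
            exact absurd ha hna)
          (by simp)
      have hcharD' : ∀ x, x ∈ S' ↔ PvConn E k x := by
        intro x
        rw [hcharD x]
        constructor
        · exact fun h => h.1
        · intro h
          refine ⟨h, fun hxV => ?_⟩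
          obtain ⟨q, hq, hc⟩ := (hvisA x).mp hxV
          exact hnotconn ⟨q, hq, hc.trans h.symm⟩
      -- the two inserted values coincide
      have hSnod : S'.Nodup := hnodD.of_append_right
      have hfilnod : ((pvNodes E).filter (fun x => L.getD x "" == L.getD k "")).Nodup :=
        (pvNodes_nodup E).filter _
      have hmemiff : ∀ x, x ∈ S' ↔
          x ∈ (pvNodes E).filter (fun x => L.getD x "" == L.getD k "") := by
        intro x
        rw [hcharD' x, List.mem_filter]
        constructor
        · intro h
          have hxE : x ∈ pvNodes E := by
            rcases pvConn_eq_or_mem h with rfl | ⟨_, h2⟩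
            exacts [hkE, h2]
          exact ⟨hxE, by simp [(hLiff x hxE k hkE).mpr h.symm]⟩
        · rintro ⟨hxE, hbeq⟩
          have : L.getD x "" = L.getD k "" := by simpa using hbeq
          exact ((hLiff x hxE k hkE).mp this).symm
      have hperm : List.Perm S' ((pvNodes E).filter (fun x => L.getD x "" == L.getD k "")) :=
        (List.perm_ext_iff_of_nodup hSnod hfilnod).mpr hmemiff
      have hvals : 0 + (S'.map (pvFreq nf)).sum = sums.getD (L.getD k "") 0 := by
        rw [hsums, (hperm.map (pvFreq nf)).sum_eq]
        ring
      rw [show pvStepA nf g (visA, dA) k =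
            (visA ++ S', dA.insert k (0 + (S'.map (pvFreq nf)).sum)) by
          simp only [pvStepA, if_neg hk, pvAddAllSynonyms]
          rw [heqD],
        show pvStepB L sums (seen, dB) k =
            (PySem.Set.add seen (L.getD k ""), dB.insert k (sums.getD (L.getD k "") 0)) by
          simp [pvStepB, hkB]]
      refine ih (p ++ [k]) (visA ++ S') _ (PySem.Set.add seen (L.getD k "")) _ hsplit'
        ?_ hnodD ?_ ?_ (by rw [hd, hvals])
      · intro x
        rw [List.mem_append, hvisA, hcharD' x]
        constructor
        · rintro (⟨q, hq, hc⟩ | hc)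
          · exact ⟨q, List.mem_append_left _ hq, hc⟩
          · exact ⟨k, List.mem_append_right _ (List.mem_singleton.mpr rfl), hc⟩
        · rintro ⟨q, hq, hc⟩
          rcases List.mem_append.mp hq with hq | hq
          · exact Or.inl ⟨q, hq, hc⟩
          · simp only [List.mem_singleton] at hq
            exact Or.inr (hq ▸ hc)
      · intro a ha b hedge
        rcases List.mem_append.mp ha with ha | ha
        · exact List.mem_append_left _ (hclosed a ha b hedge)
        · have hkb : PvConn E k b := ((hcharD' a).mp ha).trans (pvConn_of_edge hedge)
          exact List.mem_append_right _ ((hcharD' b).mpr hkb)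
      · intro c
        rw [PySem.Set.mem_add, hseen]
        constructor
        · rintro (⟨q, hq, hc⟩ | hc)
          · exact ⟨q, List.mem_append_left _ hq, hc⟩
          · exact ⟨k, List.mem_append_right _ (List.mem_singleton.mpr rfl), hc⟩
        · rintro ⟨q, hq, hc⟩
          rcases List.mem_append.mp hq with hq | hq
          · exact Or.inl ⟨q, hq, hc⟩
          · simp only [List.mem_singleton] at hq
            exact Or.inr (hq ▸ hc)

lemma pv_main (nf : List (String × Int)) (sn : List (List String)) :
    baby_names nf sn = baby_names_alt nf sn := by
  obtain ⟨hk, hval, hiff⟩ := pvUnionE_inv (pvPairs sn)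
  have hA : baby_names nf sn =
      (((pvBuildE (pvPairs sn)).keys).foldl (pvStepA nf (pvBuildE (pvPairs sn)))
        (PySem.Set.empty, PySem.Dict.empty)).2.items := by
    unfold baby_names
    rw [pvBuildGraph_eq]
  have hB : baby_names_alt nf sn =
      (((pvUnionE (pvPairs sn)).keys).foldl
        (pvStepB (pvUnionE (pvPairs sn))
          (((pvUnionE (pvPairs sn)).keys).foldl
            (fun d x => d.modify ((pvUnionE (pvPairs sn)).getD x "") 0 (· + pvFreq nf x))
            PySem.Dict.empty))
        (PySem.Set.empty, PySem.Dict.empty)).2.items := by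
    unfold baby_names_alt
    rw [pvUnionPairs_eq]
  rw [hA, hB, hk, pvBuildE_keys]
  have hsums : ∀ c : String,
      ((pvNodes (pvPairs sn)).foldl
        (fun d x => d.modify ((pvUnionE (pvPairs sn)).getD x "") 0 (· + pvFreq nf x))
        PySem.Dict.empty).getD c 0 =
      (((pvNodes (pvPairs sn)).filter
        (fun x => (pvUnionE (pvPairs sn)).getD x "" == c)).map (pvFreq nf)).sum := by
    intro c
    rw [pvSumsFold_getD]
    simp
  refine congrArg PySem.Dict.items
    (pvOuter_joint nf (pvPairs sn) (pvBuildE (pvPairs sn)) (pvUnionE (pvPairs sn)) _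
      (pvBuildE_adj (pvPairs sn)) hiff hsums (pvNodes (pvPairs sn)) [] _ _ _ _
      (by simp) (by simp [PySem.Set.empty]) List.nodup_nil
      (by intro a ha; simp at ha) (by simp [PySem.Set.empty]) rfl)

-- ===== VERDICT (by name: the statement is the Claim_ definition above) =====
theorem baby_names_spec : Claim_equal_baby_names := by
  intro name_frequency same_names _ _
  unfold Spec_baby_names
  exact pv_main name_frequency same_names
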